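-- pv_equiv track=rewrite | github.com/SimonChumaceroEspada/MotorDeBusquedaPersonal | buscador-lucene/python/extract_office.py | get_location_info
-- ===== SOURCE A (Python) =====
-- def get_location_info(content, position):
--     """
--     Identifica en qué hoja/diapositiva se encuentra la coincidencia
--
--     Args:
--         content: El contenido completo
--         position: La posición de la coincidencia
--
--     Returns:
--         Información de ubicación (hoja/diapositiva)
--     """
--     # Encontrar la última marca de hoja/diapositiva antes de la posición
--     lines = content[:position].split('\n')
--
--     for i in range(len(lines)-1, -1, -1):
--         if lines[i].startswith('Sheet:'):
--             return lines[i]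
--         elif lines[i].startswith('Slide '):
--             return lines[i]
--
--     return "Ubicación desconocida"
-- ===== SOURCE B (Python) =====
-- def get_location_info(content, position):
--     """Single forward pass keeping the last marker line seen (instead of
--     splitting and scanning the line list backwards for the first match)."""
--     result = "Ubicación desconocida"
--     for line in content[:position].split('\n'):
--         if line.startswith('Sheet:') or line.startswith('Slide '):
--             result = line
--     return result
-- ===== Notes on version B (the rewrite author's own statement) =====
-- stated objective: simpler
-- what changed: B replaces the backward index loop with early return over the split line list by a single forward fold that keeps the last marker line seen, returning it (or the default) at the end.
import Mathlib
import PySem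

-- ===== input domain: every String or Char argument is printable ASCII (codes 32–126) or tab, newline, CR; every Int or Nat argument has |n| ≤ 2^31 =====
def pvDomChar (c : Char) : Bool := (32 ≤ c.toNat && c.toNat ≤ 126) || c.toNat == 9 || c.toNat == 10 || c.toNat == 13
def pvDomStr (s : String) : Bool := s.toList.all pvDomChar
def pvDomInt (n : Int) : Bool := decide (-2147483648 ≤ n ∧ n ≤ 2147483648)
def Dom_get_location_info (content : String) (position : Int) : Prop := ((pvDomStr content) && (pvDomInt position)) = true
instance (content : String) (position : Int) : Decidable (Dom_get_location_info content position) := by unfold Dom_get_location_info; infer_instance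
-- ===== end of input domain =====

-- B replaces A's backward index loop (first match from the end) by a single forward
-- fold keeping the last marker line seen; objective: simpler.

-- ===== PORT A =====
-- backward loop 'for i in range(len(lines)-1, -1, -1)', recursion on k = i+1;
-- lines.getD k "" is exact here because the loop index is always in range
def getLocGoA (lines : List String) : Nat → String
  | 0 => "Ubicación desconocida"
  | k+1 =>
      let l := lines.getD k ""
      if PySem.Str.startswith l "Sheet:" then l
      else if PySem.Str.startswith l "Slide " then l
      else getLocGoA lines k

def get_location_info (content : String) (position : Int) : String :=
  let lines := (PySem.Str.split? (PySem.Str.slice content none (some position)) "\n").getD []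
  getLocGoA lines lines.length

-- ===== PORT B =====
def get_location_info_alt (content : String) (position : Int) : String :=
  let lines := (PySem.Str.split? (PySem.Str.slice content none (some position)) "\n").getD []
  lines.foldl
    (fun acc line =>
      if PySem.Str.startswith line "Sheet:" || PySem.Str.startswith line "Slide " then line
      else acc)
    "Ubicación desconocida"

-- ===== PRECONDITION & SPEC =====
def Spec_get_location_info (content : String) (position : Int) (out : String) : Prop := out = get_location_info_alt content position
instance (content : String) (position : Int) (out : String) : Decidable (Spec_get_location_info content position out) := by unfold Spec_get_location_info; infer_instance

-- ===== CLAIM (what is proved, stated in full; the proofs are below) =====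
def Claim_equal_get_location_info : Prop := ∀ (content : String) (position : Int), Dom_get_location_info content position → Spec_get_location_info content position (get_location_info content position)

-- ===== LEMMAS AND PROOFS =====

theorem getLocGoA_append (xs : List String) (x : String) (k : Nat) (hk : k ≤ xs.length) :
    getLocGoA (xs ++ [x]) k = getLocGoA xs k := by
  induction k with
  | zero => rfl
  | succ k ih =>
      have hlt : k < xs.length := hk
      simp only [getLocGoA, List.getD, List.getElem?_append_left hlt, ih (Nat.le_of_lt hlt)]

theorem getLocGoA_eq_foldl (xs : List String) :
    getLocGoA xs xs.length =
      xs.foldl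
        (fun acc line =>
          if PySem.Str.startswith line "Sheet:" || PySem.Str.startswith line "Slide " then line
          else acc)
        "Ubicación desconocida" := by
  induction xs using List.reverseRecOn with
  | nil => rfl
  | append_singleton xs x ih =>
      rw [List.foldl_append, ← ih]
      simp only [List.length_append, List.length_singleton]
      show getLocGoA (xs ++ [x]) (xs.length + 1) = _
      simp only [getLocGoA, List.getD, List.getElem?_append_right (Nat.le_refl _),
        Nat.sub_self, List.getElem?_cons_zero, Option.getD_some,
        getLocGoA_append xs x xs.length (Nat.le_refl _)]
      split_ifs <;> simp_all

-- ===== VERDICT (by name: the statement is the Claim_ definition above) =====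
theorem get_location_info_spec : Claim_equal_get_location_info := by
  intro content position _
  show get_location_info content position = get_location_info_alt content position
  unfold get_location_info get_location_info_alt
  exact getLocGoA_eq_foldl _
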